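-- pv_equiv track=rewrite | github.com/whycode01/internshipwork | ai-project-repo/backend/langgraph_workflow/agents.py | _extract_technical_responses
-- ===== SOURCE A (Python) =====
-- from typing import Any, Dict, List
--
-- def _extract_technical_responses(structured_transcript: Dict) -> str:
--     """Extract technical responses from transcript."""
--     technical_keywords = ['python', 'programming', 'code', 'algorithm', 'technical', 'software', 'development']
--     candidate_responses = structured_transcript.get('candidate_responses', [])
--
--     technical_responses = []
--     for response in candidate_responses:
--         if any(keyword.lower() in response.lower() for keyword in technical_keywords):
--             technical_responses.append(response)
--
--     return '\n'.join(technical_responses)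
-- ===== SOURCE B (Python) =====
-- _KEYWORDS = ['python', 'programming', 'code', 'algorithm', 'technical', 'software', 'development']
--
--
-- def _has_technical(low):
--     """Single left-to-right scan: at each position, test whether a keyword starts there."""
--     for i in range(len(low)):
--         for k in _KEYWORDS:
--             if low.startswith(k, i):
--                 return True
--     return False
--
--
-- def _extract_technical_responses(structured_transcript):
--     """Extract technical responses from transcript."""
--     result = None
--     for response in structured_transcript.get('candidate_responses', []):
--         if _has_technical(response.lower()):
--             result = response if result is None else result + '\n' + response
--     return '' if result is None else result
-- ===== Notes on version B (the rewrite author's own statement) =====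
-- stated objective: alternative
-- what changed: The keyword-major test (seven independent substring scans 'keyword in response.lower()' per response) is replaced by one position-major left-to-right scan per lowered response that checks at each index whether any keyword starts there, and the intermediate filtered list plus '\n'.join is replaced by a single fold that accumulates the joined string directly.
import Mathlib
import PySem

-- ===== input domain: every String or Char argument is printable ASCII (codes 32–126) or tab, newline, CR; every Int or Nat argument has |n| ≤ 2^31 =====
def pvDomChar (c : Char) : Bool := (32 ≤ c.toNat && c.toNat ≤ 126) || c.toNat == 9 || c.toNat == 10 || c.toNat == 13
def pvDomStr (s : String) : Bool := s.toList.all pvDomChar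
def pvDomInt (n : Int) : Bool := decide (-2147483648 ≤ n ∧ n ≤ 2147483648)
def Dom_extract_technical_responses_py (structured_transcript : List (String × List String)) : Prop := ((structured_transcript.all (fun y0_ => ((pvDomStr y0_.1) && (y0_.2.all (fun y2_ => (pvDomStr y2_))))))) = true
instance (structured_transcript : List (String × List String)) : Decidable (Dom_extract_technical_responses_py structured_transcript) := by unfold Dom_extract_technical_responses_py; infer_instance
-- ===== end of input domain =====

-- B replaces the keyword-major 'any(k in response.lower())' seven-substring-scan filter-then-join by a
-- position-major single scan per response (at each index, test whether any keyword starts there) that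
-- accumulates the joined string directly instead of building an intermediate list; objective: alternative.


-- dict.get('candidate_responses', []) on the association list: first match, else []
def pvGetCandidateResponses (d : List (String × List String)) : List String :=
  match d.find? (fun p => p.1 == "candidate_responses") with
  | some p => p.2
  | none => []

-- ===== PORT A =====
def extract_technical_responses_py (structured_transcript : List (String × List String)) : String :=
  let technical_keywords : List String :=
    ["python", "programming", "code", "algorithm", "technical", "software", "development"]
  let candidate_responses := pvGetCandidateResponses structured_transcript
  let technical_responses := candidate_responses.foldl (fun acc response =>
    if technical_keywords.any (fun keyword =>
        PySem.Str.isIn (PySem.Str.lower keyword) (PySem.Str.lower response)) then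
      acc ++ [response]
    else acc) []
  PySem.Str.join "\n" technical_responses

-- ===== PORT B =====
def pvKeywordsB : List (List Char) :=
  ["python", "programming", "code", "algorithm", "technical", "software", "development"].map String.toList

-- for i in range(len(low)): for k in _KEYWORDS: if low.startswith(k, i): return True
def pvHasTechnical : List Char → Bool
  | [] => false
  | c :: rest => pvKeywordsB.any (fun k => k.isPrefixOf (c :: rest)) || pvHasTechnical rest

def extract_technical_responses_py_alt (structured_transcript : List (String × List String)) : String :=
  let result := (pvGetCandidateResponses structured_transcript).foldl
    (fun (result : Option (List Char)) response =>
      if pvHasTechnical (PySem.Chars.lower response.toList) then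
        some (match result with
              | none => response.toList
              | some r => r ++ '\n' :: response.toList)
      else result) none
  String.ofList (result.getD [])

-- ===== PRECONDITION & SPEC =====
def Spec_extract_technical_responses_py (structured_transcript : List (String × List String)) (out : String) : Prop := out = extract_technical_responses_py_alt structured_transcript
instance (structured_transcript : List (String × List String)) (out : String) : Decidable (Spec_extract_technical_responses_py structured_transcript out) := by unfold Spec_extract_technical_responses_py; infer_instance

-- ===== CLAIM (what is proved, stated in full; the proofs are below) =====
def Claim_equal_extract_technical_responses_py : Prop := ∀ (structured_transcript : List (String × List String)), Dom_extract_technical_responses_py structured_transcript → Spec_extract_technical_responses_py structured_transcript (extract_technical_responses_py structured_transcript)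

-- ===== LEMMAS AND PROOFS =====

-- pvHasTechnical low is true iff some keyword occurs as a prefix of some suffix of low
lemma pvHasTechnical_iff (low : List Char) :
    pvHasTechnical low = true ↔ ∃ k ∈ pvKeywordsB, ∃ j, k <+: low.drop j := by
  induction low with
  | nil =>
    simp only [pvHasTechnical, Bool.false_eq_true, false_iff]
    rintro ⟨k, hk, j, hp⟩
    rw [List.drop_nil] at hp
    rw [List.prefix_nil] at hp
    subst hp
    have : ([] : List Char) ∉ pvKeywordsB := by decide
    exact this hk
  | cons c rest ih =>
    simp only [pvHasTechnical, Bool.or_eq_true, List.any_eq_true, ih]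
    constructor
    · rintro (⟨k, hk, hp⟩ | ⟨k, hk, j, hp⟩)
      · exact ⟨k, hk, 0, by simpa [List.isPrefixOf_iff_prefix] using hp⟩
      · exact ⟨k, hk, j + 1, by simpa using hp⟩
    · rintro ⟨k, hk, j, hp⟩
      cases j with
      | zero => exact Or.inl ⟨k, hk, by simpa [List.isPrefixOf_iff_prefix] using hp⟩
      | succ j => exact Or.inr ⟨k, hk, j, by simpa using hp⟩

-- the positional scan computes 'some keyword is an infix' (via PySem.Chars.exists_prefix_drop_iff_isIn)
lemma anyIsIn_eq (low : List Char) :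
    pvKeywordsB.any (fun k => PySem.Chars.isIn k low) = pvHasTechnical low := by
  rw [Bool.eq_iff_iff]
  simp only [List.any_eq_true, pvHasTechnical_iff]
  constructor
  · rintro ⟨k, hk, h⟩
    obtain ⟨j, hj⟩ := (PySem.Chars.exists_prefix_drop_iff_isIn k low).mpr h
    exact ⟨k, hk, j, hj⟩
  · rintro ⟨k, hk, j, hj⟩
    exact ⟨k, hk, (PySem.Chars.exists_prefix_drop_iff_isIn k low).mp ⟨j, hj⟩⟩

-- the per-response tests of the two ports agree
lemma hasTechnical_eq_anyIsIn (s : String) :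
    pvHasTechnical (PySem.Chars.lower s.toList) =
      (["python", "programming", "code", "algorithm", "technical", "software", "development"] :
        List String).any (fun keyword =>
          PySem.Str.isIn (PySem.Str.lower keyword) (PySem.Str.lower s)) := by
  have h : ∀ kw : String, PySem.Str.isIn (PySem.Str.lower kw) (PySem.Str.lower s)
      = PySem.Chars.isIn (PySem.Chars.lower kw.toList) (PySem.Chars.lower s.toList) := by
    intro kw; simp [pysem]
  rw [← anyIsIn_eq]
  simp only [List.any_cons, List.any_nil, h, pvKeywordsB, List.map]
  rw [show PySem.Chars.lower "python".toList = "python".toList from by decide,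
      show PySem.Chars.lower "programming".toList = "programming".toList from by decide,
      show PySem.Chars.lower "code".toList = "code".toList from by decide,
      show PySem.Chars.lower "algorithm".toList = "algorithm".toList from by decide,
      show PySem.Chars.lower "technical".toList = "technical".toList from by decide,
      show PySem.Chars.lower "software".toList = "software".toList from by decide,
      show PySem.Chars.lower "development".toList = "development".toList from by decide]

-- '\n'.join of a nonempty block list, written as head ++ flatMap of '\n'-prefixed tails
lemma intercalate_newline (l : List Char) (ls : List (List Char)) :
    List.intercalate ['\n'] (l :: ls) = l ++ ls.flatMap (fun r => '\n' :: r) := by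
  induction ls generalizing l with
  | nil => simp [List.intercalate]
  | cons y ys ih =>
    rw [show List.intercalate ['\n'] (l :: y :: ys) = l ++ ['\n'] ++ List.intercalate ['\n'] (y :: ys)
          from by simp [List.intercalate, List.intersperse], ih]
    simp

-- B's option-accumulating fold, started from some a, appends '\n'-prefixed filtered responses
lemma foldB_some (p : String → Bool) (rs : List String) (a : List Char) :
    rs.foldl (fun (result : Option (List Char)) response =>
      if p response then
        some (match result with
              | none => response.toList
              | some r => r ++ '\n' :: response.toList)
      else result) (some a) =
    some (a ++ (rs.filter p).flatMap (fun r => '\n' :: r.toList)) := by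
  induction rs generalizing a with
  | nil => simp
  | cons x xs ih => by_cases hx : p x <;> simp [hx, ih]

lemma foldB_none (p : String → Bool) (rs : List String) :
    (rs.foldl (fun (result : Option (List Char)) response =>
      if p response then
        some (match result with
              | none => response.toList
              | some r => r ++ '\n' :: response.toList)
      else result) none).getD [] =
    PySem.Chars.join "\n".toList ((rs.filter p).map String.toList) := by
  induction rs with
  | nil => simp [PySem.Chars.join, List.intercalate]
  | cons x xs ih =>
    by_cases hx : p x
    · simp only [List.foldl_cons, hx, if_pos, List.filter_cons_of_pos hx, foldB_some]
      rw [Option.getD_some, List.map_cons, PySem.Chars.join,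
          show "\n".toList = ['\n'] from by decide, intercalate_newline]
      simp [List.flatMap_map]
    · simp [hx, ih]

-- ===== VERDICT (by name: the statement is the Claim_ definition above) =====
theorem extract_technical_responses_py_spec : Claim_equal_extract_technical_responses_py := by
  intro st _
  unfold Spec_extract_technical_responses_py
  unfold extract_technical_responses_py extract_technical_responses_py_alt
  simp only [← hasTechnical_eq_anyIsIn]
  rw [PySem.List.foldl_append_if, foldB_none]
  simp [PySem.Str.join]
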